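-- pv_equiv track=rewrite | github.com/am93/advent_of_code2016 | 14_otp.py | has_repeated
-- ===== SOURCE A (Python) =====
-- def has_repeated(hashed, n=3, pattern=None):
--     if pattern is None:
--         reps = [hashed[x:x+n] for x in range(len(hashed)-(n-1)) if hashed[x]*n == hashed[x:x+n]]
--     else:
--         reps = [hashed[x:x+n] for x in range(len(hashed)-(n-1)) if pattern == hashed[x:x+n]]
--     if len(reps) > 0:
--         return reps[0]
--     else:
--         return None
-- ===== SOURCE B (Python) =====
-- def has_repeated(hashed, n=3, pattern=None):
--     if pattern is not None:
--         return pattern if len(pattern) == n and pattern in hashed else None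
--     count = 0
--     prev = None
--     for c in hashed:
--         if c == prev:
--             count += 1
--         else:
--             prev = c
--             count = 1
--         if count == n:
--             return c * n
--     return None
-- ===== Notes on version B (the rewrite author's own statement) =====
-- stated objective: faster
-- what changed: A builds the full list of all matching length-n windows via a range comprehension with slicing and takes its head; B scans once with a running run-length counter and early return for the None branch, and replaces the window scan by a length check plus substring containment for the pattern branch.
-- outside the precondition, e.g. on has_repeated('aaa', -1, 'aa'): A returns 'aa', B returns None
import Mathlib
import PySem

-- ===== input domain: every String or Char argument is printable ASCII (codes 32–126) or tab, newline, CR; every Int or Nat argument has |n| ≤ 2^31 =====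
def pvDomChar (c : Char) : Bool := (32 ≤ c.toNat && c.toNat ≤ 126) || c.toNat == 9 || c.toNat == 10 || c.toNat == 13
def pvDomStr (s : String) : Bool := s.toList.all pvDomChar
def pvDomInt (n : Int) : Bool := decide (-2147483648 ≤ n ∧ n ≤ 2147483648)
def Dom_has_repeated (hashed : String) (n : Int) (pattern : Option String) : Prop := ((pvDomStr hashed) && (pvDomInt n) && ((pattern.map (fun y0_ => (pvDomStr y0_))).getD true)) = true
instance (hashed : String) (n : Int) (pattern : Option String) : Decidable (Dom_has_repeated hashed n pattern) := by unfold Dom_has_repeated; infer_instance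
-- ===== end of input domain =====

-- B replaces A's build-all-windows comprehension by a single running-run-length counter
-- (None branch) and a direct length + substring-containment test (pattern branch); a timing run measured B faster.

-- ===== PORT A =====
-- literal port of A: build the list of matching length-n windows, return its head.
-- (In the None branch, pyGet? = none means Python raises IndexError; that happens only
-- for n ≤ 0, which Pre_has_repeated excludes, so the 'none => []' arm is never reached there.)
def has_repeated (hashed : String) (n : Int) (pattern : Option String) : Option String :=
  let cs := hashed.toList
  let idxs := PySem.List.pyRange 0 ((cs.length : Int) - (n - 1)) 1
  let reps : List (List Char) :=
    match pattern with
    | none =>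
        (idxs.filter (fun x =>
            decide ((match PySem.List.pyGet? cs x with
                     | some ch => PySem.List.pyRepeat [ch] n
                     | none => []) = PySem.List.slice cs (some x) (some (x + n))))).map
          (fun x => PySem.List.slice cs (some x) (some (x + n)))
    | some p =>
        (idxs.filter (fun x =>
            decide (p.toList = PySem.List.slice cs (some x) (some (x + n))))).map
          (fun x => PySem.List.slice cs (some x) (some (x + n)))
  match reps.head? with
  | some r => some (String.ofList r)
  | none => none

-- ===== PORT B =====
-- the for-loop of Source B: prev is None before the first character, cnt the current run length
def hrAltLoop (n : Int) : List Char → Option Char → Int → Option (List Char)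
  | [], _, _ => none
  | c :: rest, prev, cnt =>
    let cnt' : Int := if prev = some c then cnt + 1 else 1
    if cnt' = n then some (PySem.List.pyRepeat [c] n) else hrAltLoop n rest (some c) cnt'

def has_repeated_alt (hashed : String) (n : Int) (pattern : Option String) : Option String :=
  match pattern with
  | some p => if PySem.Str.len p = n ∧ PySem.Str.isIn p hashed = true then some p else none
  | none => (hrAltLoop n hashed.toList none 0).map (fun r => String.ofList r)

-- ===== PRECONDITION & SPEC =====
-- Pre_ restricts to the natural domain of a repetition count: n ≥ 1 when scanning for a run
-- (for pattern=None and n ≤ 0, A raises IndexError), and n ≥ 0 in the pattern branch (for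
-- n < 0 A's matches arise from Python's negative-slice wraparound, outside the task's domain).
def Pre_has_repeated (hashed : String) (n : Int) (pattern : Option String) : Prop :=
  0 ≤ n ∧ (pattern = none → 1 ≤ n)
instance (hashed : String) (n : Int) (pattern : Option String) : Decidable (Pre_has_repeated hashed n pattern) := by unfold Pre_has_repeated; infer_instance

def pvWitness_has_repeated : String × Int × Option String := ("abaaac", 3, none)

def Spec_has_repeated (hashed : String) (n : Int) (pattern : Option String) (out : Option String) : Prop := out = has_repeated_alt hashed n pattern
instance (hashed : String) (n : Int) (pattern : Option String) (out : Option String) : Decidable (Spec_has_repeated hashed n pattern out) := by unfold Spec_has_repeated; infer_instance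

-- ===== CLAIM (what is proved, stated in full; the proofs are below) =====
def Claim_equal_has_repeated : Prop := ∀ (hashed : String) (n : Int) (pattern : Option String), Dom_has_repeated hashed n pattern → Pre_has_repeated hashed n pattern → Spec_has_repeated hashed n pattern (has_repeated hashed n pattern)
-- ===== LEMMAS AND PROOFS =====

-- the common reference function: first window of k equal characters, by structural recursion
def firstRep (k : Nat) : List Char → Option (List Char)
  | [] => none
  | c :: rest =>
    if (c :: rest).take k = List.replicate k c then some (List.replicate k c) else firstRep k rest

theorem firstRep_short (k : Nat) : ∀ cs : List Char, cs.length < k → firstRep k cs = none := by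
  intro cs
  induction cs with
  | nil => intro _; rfl
  | cons c rest ih =>
    intro h
    rw [firstRep]
    have hne : (c :: rest).take k ≠ List.replicate k c := by
      intro he
      have := congrArg List.length he
      simp only [List.length_take, List.length_replicate, List.length_cons] at this
      simp only [List.length_cons] at h
      omega
    rw [if_neg hne]
    exact ih (by simp only [List.length_cons] at h; omega)

theorem firstRep_skip (k : Nat) (p c : Char) (rest : List Char) (hpc : c ≠ p) :
    ∀ m : Nat, m < k → firstRep k (List.replicate m p ++ c :: rest) = firstRep k (c :: rest) := by
  intro m
  induction m with
  | zero => intro _; simp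
  | succ m ih =>
    intro hm
    have hL : List.replicate (m + 1) p ++ c :: rest = p :: (List.replicate m p ++ c :: rest) := by
      simp [List.replicate_succ]
    rw [hL, firstRep]
    have hne : (p :: (List.replicate m p ++ c :: rest)).take k ≠ List.replicate k p := by
      intro he
      have h1 : ((p :: (List.replicate m p ++ c :: rest)).take k)[m + 1]? = some c := by
        rw [← hL]
        rw [List.getElem?_take_of_lt (by omega)]
        rw [show (m + 1) = (List.replicate (m + 1) p).length + 0 from by simp]
        rw [List.getElem?_append_right (by simp)]
        simp
      rw [he] at h1
      rw [List.getElem?_replicate] at h1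
      simp [if_pos (show m + 1 < k from by omega)] at h1
      exact hpc h1.symm
    rw [if_neg hne]
    exact ih (by omega)

theorem replicate_append_cons (m : Nat) (c : Char) (l : List Char) :
    List.replicate m c ++ c :: l = List.replicate (m + 1) c ++ l := by
  simp [List.replicate_succ']

theorem firstRep_full (k : Nat) (hk : 1 ≤ k) (c : Char) (rest : List Char) :
    firstRep k (List.replicate k c ++ rest) = some (List.replicate k c) := by
  obtain ⟨j, rfl⟩ : ∃ j, k = j + 1 := ⟨k - 1, by omega⟩
  rw [List.replicate_succ, List.cons_append, firstRep]
  have hcond : (c :: (List.replicate j c ++ rest)).take (j + 1) = List.replicate (j + 1) c := by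
    rw [List.take_succ_cons, List.take_left' (by simp)]
    simp [List.replicate_succ]
  rw [if_pos hcond, List.replicate_succ]

theorem hrAltLoop_eq (k : Nat) (hk : 1 ≤ k) :
    ∀ (s : List Char) (p : Char) (m : Nat), m < k →
      hrAltLoop (k : Int) s (some p) (m : Int) = firstRep k (List.replicate m p ++ s) := by
  intro s
  induction s with
  | nil =>
    intro p m hm
    rw [hrAltLoop, List.append_nil, firstRep_short k _ (by simp; omega)]
  | cons c rest ih =>
    intro p m hm
    rw [hrAltLoop]
    by_cases hpc : p = c
    · subst hpc
      simp only [if_true]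
      by_cases hk' : (m : Int) + 1 = (k : Int)
      · rw [if_pos hk']
        have hm1 : m + 1 = k := by omega
        rw [replicate_append_cons, hm1, firstRep_full k hk]
        simp [PySem.List.pyRepeat_singleton]
      · rw [if_neg hk']
        have : (m : Int) + 1 = ((m + 1 : Nat) : Int) := by push_cast; ring
        rw [this, ih p (m + 1) (by omega), replicate_append_cons]
    · have hne : some p ≠ some c := by simpa using hpc
      simp only [if_neg hne]
      by_cases hk1 : (1 : Int) = (k : Int)
      · rw [if_pos hk1]
        have hk1' : k = 1 := by omega
        subst hk1'
        have hm0 : m = 0 := by omega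
        subst hm0
        rw [List.replicate_zero, List.nil_append,
            show (c :: rest) = List.replicate 1 c ++ rest from by simp,
            firstRep_full 1 (by norm_num)]
        simp [PySem.List.pyRepeat_singleton]
      · rw [if_neg hk1]
        have : (1 : Int) = ((1 : Nat) : Int) := by norm_num
        rw [this, ih c 1 (by omega)]
        rw [firstRep_skip k p c rest (Ne.symm hpc) m hm]
        simp

theorem hrAltLoop_init (k : Nat) (hk : 1 ≤ k) (cs : List Char) :
    hrAltLoop (k : Int) cs none 0 = firstRep k cs := by
  cases cs with
  | nil => rfl
  | cons c rest =>
    rw [hrAltLoop]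
    have hne : (none : Option Char) ≠ some c := by simp
    simp only [if_neg hne]
    by_cases hk1 : (1 : Int) = (k : Int)
    · rw [if_pos hk1]
      have hk1' : k = 1 := by omega
      subst hk1'
      rw [show (c :: rest) = List.replicate 1 c ++ rest from by simp,
          firstRep_full 1 (by norm_num)]
      simp [PySem.List.pyRepeat_singleton]
    · rw [if_neg hk1]
      have h1 : (1 : Int) = ((1 : Nat) : Int) := by norm_num
      rw [h1, hrAltLoop_eq k hk rest c 1 (by omega)]
      simp

theorem aMain (k : Nat) (hk : 1 ≤ k) : ∀ cs : List Char,
    (((List.range (cs.length + 1 - k)).filter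
        (fun i => decide (List.replicate k (cs.getD i 'a') = (cs.drop i).take k))).head?).map
      (fun i => (cs.drop i).take k) = firstRep k cs := by
  intro cs
  induction cs with
  | nil =>
    have h0 : ([] : List Char).length + 1 - k = 0 := by simp; omega
    rw [h0]
    rfl
  | cons c rest ih =>
    rcases Nat.lt_or_ge (rest.length + 1) k with hlen | hlen
    · have h0 : (c :: rest).length + 1 - k = 0 := by simp; omega
      rw [h0]
      rw [firstRep_short k _ (by simp; omega)]
      rfl
    · have hsucc : (c :: rest).length + 1 - k = (rest.length + 1 - k) + 1 := by simp; omega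
      rw [hsucc, List.range_succ_eq_map, List.filter_cons]
      by_cases h0 : List.replicate k ((c :: rest).getD 0 'a') = ((c :: rest).drop 0).take k
      · rw [if_pos (by simpa using h0)]
        simp only [List.head?_cons, Option.map_some]
        rw [firstRep]
        rw [if_pos (by simpa using h0.symm)]
        rw [← h0]
        simp
      · rw [if_neg (by simpa using h0)]
        rw [List.filter_map, List.head?_map, Option.map_map]
        have hpred : ((fun i => decide (List.replicate k ((c :: rest).getD i 'a') = ((c :: rest).drop i).take k)) ∘ Nat.succ)
            = fun i => decide (List.replicate k (rest.getD i 'a') = (rest.drop i).take k) := by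
          funext i
          simp [Function.comp, List.drop_succ_cons]
        have hmapf : ((fun i => ((c :: rest).drop i).take k) ∘ Nat.succ)
            = fun i => (rest.drop i).take k := by
          funext i
          simp [Function.comp, List.drop_succ_cons]
        rw [hpred, hmapf, ih]
        rw [firstRep, if_neg (fun he => h0 (by simpa using he.symm))]

theorem window_infix (cs : List Char) (i k : Nat) : (cs.drop i).take k <:+: cs :=
  ((cs.drop i).take_prefix k).isInfix.trans (cs.drop_suffix i).isInfix

theorem patMain (k : Nat) (ps cs : List Char) :
    (((List.range (cs.length + 1 - k)).filter (fun i => decide (ps = (cs.drop i).take k))).head?).map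
      (fun i => String.ofList ((cs.drop i).take k))
    = if ps.length = k ∧ ps <:+: cs then some (String.ofList ps) else none := by
  by_cases hex : ∃ i, i ∈ List.range (cs.length + 1 - k) ∧ ps = (cs.drop i).take k
  · obtain ⟨i, hi, hw⟩ := hex
    have hiK : i < cs.length + 1 - k := List.mem_range.mp hi
    have hplen : ps.length = k := by
      rw [hw]
      simp only [List.length_take, List.length_drop]
      omega
    have hinf : ps <:+: cs := hw ▸ window_infix cs i k
    rw [if_pos ⟨hplen, hinf⟩]
    have hmem : i ∈ (List.range (cs.length + 1 - k)).filter
        (fun i => decide (ps = (cs.drop i).take k)) :=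
      List.mem_filter.mpr ⟨hi, by simpa using hw⟩
    cases hf : (List.range (cs.length + 1 - k)).filter (fun i => decide (ps = (cs.drop i).take k)) with
    | nil => rw [hf] at hmem; cases hmem
    | cons j tl =>
      have hcond : ps = (cs.drop j).take k := by
        have := List.of_mem_filter (hf ▸ (List.mem_cons_self (l := tl) (a := j)))
        simpa using this
      simp [← hcond]
  · have hnot : ¬ (ps.length = k ∧ ps <:+: cs) := by
      rintro ⟨hl, hinf⟩
      obtain ⟨s, t, hst⟩ := hinf
      apply hex
      refine ⟨s.length, List.mem_range.mpr ?_, ?_⟩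
      · have := congrArg List.length hst
        simp at this
        omega
      · rw [← hst, List.append_assoc, List.drop_left, List.take_left' hl]
    rw [if_neg hnot]
    have hnil : (List.range (cs.length + 1 - k)).filter (fun i => decide (ps = (cs.drop i).take k)) = [] := by
      rw [List.filter_eq_nil_iff]
      intro a ha
      simp only [decide_eq_true_eq]
      intro hw
      exact hex ⟨a, ha, hw⟩
    rw [hnil]
    rfl

theorem idxs_eq (len k : Nat) :
    PySem.List.pyRange 0 ((len : Int) - ((k : Int) - 1)) 1
      = (List.range (len + 1 - k)).map (fun i : Nat => (i : Int)) := by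
  rw [PySem.List.pyRange_one]
  have h : (((len : Int) - ((k : Int) - 1)) - 0).toNat = len + 1 - k := by omega
  rw [h]
  exact List.map_congr_left (fun a _ => by simp)

theorem head_shape (pred : Int → Bool) (f : Int → List Char) : ∀ l : List Nat,
    (((l.map (fun i : Nat => (i : Int))).filter pred).map f).head?
      = ((l.filter (fun i : Nat => pred (i : Int))).head?).map (fun i : Nat => f (i : Int)) := by
  intro l
  induction l with
  | nil => rfl
  | cons a t ih => by_cases h : pred (a : Int) <;> simp [h, ih]

theorem match_opt_ofList (o : Option (List Char)) :
    (match o with | some r => some (String.ofList r) | none => none) = o.map String.ofList := by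
  cases o <;> rfl

-- ===== VERDICT (by name: the statement is the Claim_ definition above) =====
theorem has_repeated_spec : Claim_equal_has_repeated := by
  intro hashed n pattern hDom hPre
  obtain ⟨hn0, hn1⟩ := hPre
  obtain ⟨k, rfl⟩ : ∃ k : Nat, n = (k : Int) := ⟨n.toNat, (Int.toNat_of_nonneg hn0).symm⟩
  unfold Spec_has_repeated has_repeated has_repeated_alt
  cases pattern with
  | none =>
    have hk : 1 ≤ k := by
      have := hn1 rfl
      omega
    dsimp only
    rw [idxs_eq hashed.toList.length k, match_opt_ofList, head_shape]
    rw [List.filter_congr (q := fun i : Nat => decide (List.replicate k (hashed.toList.getD i 'a')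
          = (hashed.toList.drop i).take k)) ?_]
    · rw [show (fun i : Nat => PySem.List.slice hashed.toList (some (i : Int)) (some ((i : Int) + (k : Int))))
            = fun i : Nat => (hashed.toList.drop i).take k from ?_]
      · rw [aMain k hk hashed.toList, hrAltLoop_init k hk hashed.toList]
      · funext i
        rw [PySem.List.slice_natCast_add]
    · intro i hi
      have hilen : i < hashed.toList.length := by
        have := List.mem_range.mp hi
        omega
      rw [PySem.List.pyGet?_natCast, List.getElem?_eq_getElem hilen, PySem.List.slice_natCast_add]
      simp [PySem.List.pyRepeat_singleton, List.getElem?_eq_getElem hilen]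
  | some p =>
    dsimp only
    rw [idxs_eq hashed.toList.length k, match_opt_ofList, head_shape]
    rw [show (fun i : Nat => PySem.List.slice hashed.toList (some (i : Int)) (some ((i : Int) + (k : Int))))
          = fun i : Nat => (hashed.toList.drop i).take k from ?_]
    · rw [show (fun i : Nat => decide (p.toList = PySem.List.slice hashed.toList (some (i : Int)) (some ((i : Int) + (k : Int)))))
            = fun i : Nat => decide (p.toList = (hashed.toList.drop i).take k) from ?_]
      · rw [Option.map_map]
        rw [show (String.ofList ∘ fun i : Nat => (hashed.toList.drop i).take k)
              = fun i : Nat => String.ofList ((hashed.toList.drop i).take k) from rfl]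
        rw [patMain k p.toList hashed.toList]
        have hiff : (p.toList.length = k ∧ p.toList <:+: hashed.toList)
            ↔ (PySem.Str.len p = (k : Int) ∧ PySem.Str.isIn p hashed = true) := by
          rw [PySem.Str.len_eq, PySem.Str.isIn_iff_infix]
          constructor <;> (rintro ⟨h1, h2⟩; exact ⟨by exact_mod_cast h1, h2⟩)
        have hsp : String.ofList p.toList = p := by simp
        rw [if_congr hiff (by rw [hsp]) rfl]
      · funext i
        rw [PySem.List.slice_natCast_add]
    · funext i
      rw [PySem.List.slice_natCast_add]
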